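-- pv_equiv track=rewrite | github.com/murphybread/CodingTest | 프로그래머스/2/389479. 서버 증설 횟수/서버 증설 횟수.py | solution
-- ===== SOURCE A (Python) =====
-- def solution(players, m, k):
--     answer = 0
--     servers = []
--     for time in range(len(players)):
--         people = players[time]
--         # 운용중인 서버가 있다면
--
--         if (len(servers)>0):
--             for i in range(len(servers)-1, -1, -1):
--                 servers[i] -= 1
--                 if (servers[i] <=0):
--                     servers.pop(i)
--
--
--         if (people < (len(servers)+1)*m):
--             continue
--         else:
--             count = (people - (len(servers) *m)) // m
--             answer += count
--             for _ in range(count):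
--                 servers.append(k)
--
--
--     # 인원 수 파악
--     # 현재 운용 중인 서버 마감시한 업데이트 후 제거 [k]
--     # 현재 운영중인 서버로 가능한지?
--         # 불가능 하다면 증설하는데, 증설된 서버의 수는 필요한만큼 ,증설 횟수 += 증설된 서버의 수
--     # k시간동안 유지
--     return answer
-- ===== SOURCE B (Python) =====
-- def solution(players, m, k):
--     # Event queue of (expire_time, count) in increasing expire_time plus a running
--     # active-server count: no per-server decrement loop at each time step.
--     answer = 0
--     active = 0
--     pending = []          # scheduled expirations, expire_time strictly increasing
--     head = 0              # front of the queue (already-expired entries are skipped)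
--     for t, people in enumerate(players):
--         while head < len(pending) and pending[head][0] <= t:
--             active -= pending[head][1]
--             head += 1
--         if people < (active + 1) * m:
--             continue
--         count = (people - active * m) // m
--         answer += count
--         if count > 0:
--             active += count
--             pending.append((t + k, count))
--     return answer
-- ===== Notes on version B (the rewrite author's own statement) =====
-- stated objective: alternative
-- what changed: Instead of keeping one countdown per running server and decrementing/popping every server at every time step, B keeps a running active-server count plus a queue of scheduled (expire_time, count) events consumed by a moving head pointer, so the per-server inner loop disappears.
import Mathlib
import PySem

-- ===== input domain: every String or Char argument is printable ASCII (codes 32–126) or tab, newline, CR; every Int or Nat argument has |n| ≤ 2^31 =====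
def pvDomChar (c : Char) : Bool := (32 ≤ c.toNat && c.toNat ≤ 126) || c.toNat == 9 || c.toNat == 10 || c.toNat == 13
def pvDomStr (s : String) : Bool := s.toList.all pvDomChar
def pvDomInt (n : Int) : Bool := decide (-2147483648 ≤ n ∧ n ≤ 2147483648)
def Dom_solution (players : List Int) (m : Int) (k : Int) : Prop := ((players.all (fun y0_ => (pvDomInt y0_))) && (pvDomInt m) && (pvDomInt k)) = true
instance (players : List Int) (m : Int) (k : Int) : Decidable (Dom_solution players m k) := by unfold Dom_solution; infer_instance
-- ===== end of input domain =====

-- B replaces A's per-time decrement of every running server by a running active-server count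
-- plus a queue of scheduled expiration events (an alternative algorithm with no per-server inner loop).


-- ===== PORT A =====
-- the backward index loop `for i in range(len(servers)-1,-1,-1): servers[i]-=1; if servers[i]<=0: servers.pop(i)`:
-- processed from the last index down, each element is decremented and removed when ≤ 0; order of survivors is kept,
-- which is exactly this foldr.
def decStep (servers : List Int) : List Int :=
  servers.foldr (fun s acc => if s - 1 ≤ 0 then acc else (s - 1) :: acc) []

def solGo (m k : Int) : List Int → Int → List Int → Int
  | [], answer, _ => answer
  | people :: rest, answer, servers =>
    let servers' := if 0 < servers.length then decStep servers else servers
    if people < ((servers'.length : Int) + 1) * m then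
      solGo m k rest answer servers'
    else
      let count := PySem.Int.floordiv (people - (servers'.length : Int) * m) m
      solGo m k rest (answer + count) (servers' ++ List.replicate count.toNat k)

def solution (players : List Int) (m : Int) (k : Int) : Int :=
  solGo m k players 0 []

-- ===== PORT B =====
-- the `while head < len(pending) and pending[head][0] <= t` loop: the queue is pending[head:],
-- advancing head = dropping the front of the queue.
def drainGo (t : Int) : List (Int × Int) → Int → List (Int × Int) × Int
  | [], active => ([], active)
  | (e, c) :: rest, active =>
    if e ≤ t then drainGo t rest (active - c) else ((e, c) :: rest, active)

def altGo (m k : Int) : List Int → Int → Int → Int → List (Int × Int) → Int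
  | [], answer, _, _, _ => answer
  | people :: rest, answer, t, active, pending =>
    let st := drainGo t pending active
    if people < (st.2 + 1) * m then
      altGo m k rest answer (t + 1) st.2 st.1
    else
      let count := PySem.Int.floordiv (people - st.2 * m) m
      if 0 < count then
        altGo m k rest (answer + count) (t + 1) (st.2 + count) (st.1 ++ [(t + k, count)])
      else
        altGo m k rest (answer + count) (t + 1) st.2 st.1

def solution_alt (players : List Int) (m : Int) (k : Int) : Int :=
  altGo m k players 0 0 0 []

-- ===== PRECONDITION & SPEC =====
-- Pre_ excludes exactly the inputs on which Python A raises ZeroDivisionError (m = 0 while some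
-- player count is ≥ 0 reaches `... // m`); B raises the same exception there.
def Pre_solution (players : List Int) (m : Int) (k : Int) : Prop :=
  m ≠ 0 ∨ ∀ p ∈ players, p < 0
instance (players : List Int) (m : Int) (k : Int) : Decidable (Pre_solution players m k) := by
  unfold Pre_solution; infer_instance

def pvWitness_solution : List Int × Int × Int := ([3, 0, 7, 2], 2, 3)

def Spec_solution (players : List Int) (m : Int) (k : Int) (out : Int) : Prop := out = solution_alt players m k
instance (players : List Int) (m : Int) (k : Int) (out : Int) : Decidable (Spec_solution players m k out) := by unfold Spec_solution; infer_instance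

-- ===== CLAIM (what is proved, stated in full; the proofs are below) =====
def Claim_equal_solution : Prop := ∀ (players : List Int) (m : Int) (k : Int), Dom_solution players m k → Pre_solution players m k → Spec_solution players m k (solution players m k)

-- ===== LEMMAS AND PROOFS =====

-- A's server list, reconstructed from B's event queue at time boundary t: an event (e, c)
-- stands for c servers whose remaining life at boundary t is e - t + 1.
def reify (t : Int) (q : List (Int × Int)) : List Int :=
  q.flatMap (fun p => List.replicate p.2.toNat (p.1 - t + 1))

lemma foldr_dec_acc (xs acc : List Int) :
    xs.foldr (fun s acc => if s - 1 ≤ 0 then acc else (s - 1) :: acc) acc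
      = xs.foldr (fun s acc => if s - 1 ≤ 0 then acc else (s - 1) :: acc) [] ++ acc := by
  induction xs with
  | nil => simp
  | cons x xs ih =>
      simp only [List.foldr_cons]
      rw [ih]
      split_ifs <;> simp

lemma decStep_append (xs ys : List Int) :
    decStep (xs ++ ys) = decStep xs ++ decStep ys := by
  unfold decStep
  rw [List.foldr_append, foldr_dec_acc]

lemma decStep_replicate (n : Nat) (v : Int) :
    decStep (List.replicate n v) = if v - 1 ≤ 0 then [] else List.replicate n (v - 1) := by
  induction n with
  | zero => simp [decStep]
  | succ n ih =>
      rw [List.replicate_succ]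
      show (if v - 1 ≤ 0 then decStep (List.replicate n v)
            else (v - 1) :: decStep (List.replicate n v)) = _
      rw [ih]
      split_ifs with h
      · rfl
      · rw [List.replicate_succ]

lemma drain_eq (t : Int) (q : List (Int × Int)) (a : Int) :
    drainGo t q a =
      (q.dropWhile (fun p => decide (p.1 ≤ t)),
       a - ((q.takeWhile (fun p => decide (p.1 ≤ t))).map Prod.snd).sum) := by
  induction q generalizing a with
  | nil => simp [drainGo]
  | cons p rest ih =>
      obtain ⟨e, c⟩ := p
      by_cases h : e ≤ t
      · simp [drainGo, h, ih]
        ring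
      · simp [drainGo, h]

lemma dropWhile_of_head_gt (t : Int) (rest : List (Int × Int))
    (h : ∀ p ∈ rest, t < p.1) :
    rest.dropWhile (fun p => decide (p.1 ≤ t)) = rest := by
  cases rest with
  | nil => simp
  | cons p rs =>
      have := h p (by simp)
      simp [List.dropWhile_cons, not_le.mpr this]

lemma decStep_reify (t : Int) (q : List (Int × Int))
    (hsort : q.Pairwise (fun p r => p.1 < r.1)) :
    decStep (reify t q) = reify (t + 1) (q.dropWhile (fun p => decide (p.1 ≤ t))) := by
  induction q with
  | nil => simp [reify, decStep]
  | cons p rest ih =>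
      obtain ⟨e, c⟩ := p
      have hsr : rest.Pairwise (fun p r => p.1 < r.1) := hsort.tail
      have hrel : ∀ r ∈ rest, e < r.1 := (List.pairwise_cons.mp hsort).1
      have hsplit : reify t ((e, c) :: rest) =
          List.replicate c.toNat (e - t + 1) ++ reify t rest := by
        simp [reify]
      rw [hsplit, decStep_append, decStep_replicate, ih hsr]
      by_cases h : e ≤ t
      · have h2 : e - t + 1 - 1 ≤ 0 := by omega
        rw [if_pos h2]
        simp [List.dropWhile_cons, h]
      · have h2 : ¬ (e - t + 1 - 1 ≤ 0) := by omega
        rw [if_neg h2]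
        have hdw : rest.dropWhile (fun p => decide (p.1 ≤ t)) = rest :=
          dropWhile_of_head_gt t rest (fun r hr => lt_trans (not_le.mp h) (hrel r hr))
        rw [hdw]
        have hlife : e - t + 1 - 1 = e - (t + 1) + 1 := by omega
        simp [List.dropWhile_cons, h, reify, hlife]

lemma length_reify (t : Int) (q : List (Int × Int))
    (hpos : ∀ p ∈ q, 0 < p.2) :
    ((reify t q).length : Int) = (q.map Prod.snd).sum := by
  induction q with
  | nil => simp [reify]
  | cons p rest ih =>
      obtain ⟨e, c⟩ := p
      have hc : 0 < c := hpos (e, c) (by simp)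
      have ih' := ih (fun r hr => hpos r (by simp [hr]))
      simp [reify] at ih' ⊢
      omega

lemma reify_append_event (t k count : Int) (q : List (Int × Int)) :
    reify (t + 1) q ++ List.replicate count.toNat k = reify (t + 1) (q ++ [(t + k, count)]) := by
  have h : t + k - (t + 1) + 1 = k := by omega
  simp [reify, h]

lemma go_eq (m k : Int) (ps : List Int) :
    ∀ (answer t : Int) (q : List (Int × Int)),
      q.Pairwise (fun p r => p.1 < r.1) →
      (∀ p ∈ q, 0 < p.2) →
      (∀ p ∈ q, p.1 < t + k) →
      solGo m k ps answer (reify t q) = altGo m k ps answer t ((q.map Prod.snd).sum) q := by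
  induction ps with
  | nil => intro answer t q _ _ _; simp [solGo, altGo]
  | cons people rest ih =>
      intro answer t q hsort hpos hkey
      set q' := q.dropWhile (fun p => decide (p.1 ≤ t)) with hq'
      have hsub : List.Sublist q' q := List.dropWhile_sublist _
      have hsort' : q'.Pairwise (fun p r => p.1 < r.1) := hsort.sublist hsub
      have hpos' : ∀ p ∈ q', 0 < p.2 := fun p hp => hpos p (hsub.subset hp)
      have hkey' : ∀ p ∈ q', p.1 < t + k := fun p hp => hkey p (hsub.subset hp)
      -- A's decremented/filtered server list equals the drained queue's reification
      have hdec : decStep (reify t q) = reify (t + 1) q' := decStep_reify t q hsort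
      have hservers' :
          (if 0 < (reify t q).length then decStep (reify t q) else reify t q)
            = reify (t + 1) q' := by
        by_cases h : 0 < (reify t q).length
        · simp [h, hdec]
        · have hnil : reify t q = [] := by
            cases hr : reify t q with
            | nil => rfl
            | cons a l => rw [hr] at h; simp at h
          rw [hnil] at hdec ⊢
          simp [decStep] at hdec
          simp [h, ← hdec]
      -- B's drained active count equals that list's length
      have hsum : (q.map Prod.snd).sum -
          ((q.takeWhile (fun p => decide (p.1 ≤ t))).map Prod.snd).sum = (q'.map Prod.snd).sum := by
        have hsplit : ((q.takeWhile (fun p => decide (p.1 ≤ t))).map Prod.snd).sum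
            + ((q.dropWhile (fun p => decide (p.1 ≤ t))).map Prod.snd).sum
            = (q.map Prod.snd).sum := by
          rw [← List.sum_append, ← List.map_append, List.takeWhile_append_dropWhile]
        rw [hq']
        omega
      have hlen : ((reify (t + 1) q').length : Int) = (q'.map Prod.snd).sum :=
        length_reify (t + 1) q' hpos'
      show solGo m k (people :: rest) answer (reify t q)
          = altGo m k (people :: rest) answer t ((q.map Prod.snd).sum) q
      rw [solGo, altGo, drain_eq]
      simp only [hservers', hsum, ← hq', hlen]
      by_cases hb : people < ((q'.map Prod.snd).sum + 1) * m
      · rw [if_pos hb, if_pos hb]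
        exact ih answer (t + 1) q' hsort' hpos'
          (fun p hp => by have := hkey' p hp; omega)
      · rw [if_neg hb, if_neg hb]
        set count := PySem.Int.floordiv (people - (q'.map Prod.snd).sum * m) m with hcnt
        by_cases hc : 0 < count
        · rw [if_pos hc]
          have hkq : ∀ p ∈ q' ++ [(t + k, count)], 0 < p.2 := by
            intro p hp
            rcases List.mem_append.mp hp with h | h
            · exact hpos' p h
            · simp at h; subst h; exact hc
          have hsrt : (q' ++ [(t + k, count)]).Pairwise (fun p r => p.1 < r.1) := by
            rw [List.pairwise_append]
            exact ⟨hsort', by simp, by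
              intro a ha b hb'; simp at hb'; subst hb'; exact hkey' a ha⟩
          have hky : ∀ p ∈ q' ++ [(t + k, count)], p.1 < (t + 1) + k := by
            intro p hp
            rcases List.mem_append.mp hp with h | h
            · have := hkey' p h; omega
            · simp at h; subst h
              simpa using (by omega : t + k < t + 1 + k)
          have hrec := ih (answer + count) (t + 1) (q' ++ [(t + k, count)]) hsrt hkq hky
          rw [reify_append_event t k count q']
          simpa using hrec
        · rw [if_neg hc]
          have hz : count.toNat = 0 := by omega
          rw [hz]
          simpa using ih (answer + count) (t + 1) q' hsort' hpos'
            (fun p hp => by have := hkey' p hp; omega)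

-- ===== VERDICT (by name: the statement is the Claim_ definition above) =====
theorem solution_spec : Claim_equal_solution := by
  intro players m k _ _
  unfold Spec_solution solution solution_alt
  have h := go_eq m k players 0 0 [] (by simp) (by simp) (by simp)
  simpa [reify] using h
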